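-- pv_equiv track=rewrite | github.com/taemchoi/python | 7_days.py | solution
-- ===== SOURCE A (Python) =====
-- def solution(answers):
--     answer = []
--     a = [1,2,3,4,5]*8
--     b = [2,1,2,3,2,4,2,5]*5
--     c = [3,3,1,1,2,2,4,4,5,5]*4
--     if len(a) < len(answers):
--         num = (len(answers)//len(a)+1)
--         a *=num
--         b *=num
--         c *=num
--     count = [0,0,0]
--     for idx, i in enumerate(answers):
--         if a[idx] == i:
--             count[0]+=1
--         if b[idx] == i:
--             count[1]+=1
--         if c[idx] == i:
--             count[2]+=1
--     for idx, i in enumerate(count, start=1):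
--         if i>=max(count):
--             answer.append(idx)
--     return answer
-- ===== SOURCE B (Python) =====
-- def solution(answers):
--     # Histogram pass: 40 = lcm(5, 8, 10), so (i % 40) determines every pattern's value at i.
--     freq = {}
--     for i, v in enumerate(answers):
--         key = (i % 40, v)
--         freq[key] = freq.get(key, 0) + 1
--     patterns = [[1, 2, 3, 4, 5], [2, 1, 2, 3, 2, 4, 2, 5], [3, 3, 1, 1, 2, 2, 4, 4, 5, 5]]
--     counts = [sum(freq.get((r, p[r % len(p)]), 0) for r in range(40)) for p in patterns]
--     m = max(counts)
--     return [i + 1 for i, c in enumerate(counts) if c == m]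
-- ===== Notes on version B (the rewrite author's own statement) =====
-- stated objective: alternative
-- what changed: B replaces A's tiled-pattern comparison loop by a residue histogram: one pass builds a dict keyed by (i % 40, value) (40 = lcm of the three pattern periods), then each pattern's score is a fixed 40-term sum of dict lookups; the maximum selection is unchanged.
import Mathlib
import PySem

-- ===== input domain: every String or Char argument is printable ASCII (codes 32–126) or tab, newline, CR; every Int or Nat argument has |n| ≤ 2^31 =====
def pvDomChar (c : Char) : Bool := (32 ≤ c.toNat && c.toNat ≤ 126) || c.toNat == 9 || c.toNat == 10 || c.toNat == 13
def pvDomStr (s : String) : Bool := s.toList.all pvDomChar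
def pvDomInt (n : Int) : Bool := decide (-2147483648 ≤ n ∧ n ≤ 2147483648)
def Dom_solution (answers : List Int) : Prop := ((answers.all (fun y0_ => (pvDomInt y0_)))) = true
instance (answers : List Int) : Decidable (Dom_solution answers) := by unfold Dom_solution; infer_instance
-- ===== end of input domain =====

-- B uses a different data structure: one pass builds a histogram dict keyed by (i % 40, value)
-- (40 = lcm of the three pattern periods), then each pattern's score is a fixed 40-term sum of
-- dict lookups; A instead tiles the three patterns and compares element by element.

-- ===== PORT A =====
-- Python list repetition p * k
def pyRep (k : Nat) (p : List Int) : List Int := (List.replicate k p).flatten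

def solution (answers : List Int) : List Int :=
  let a := pyRep 8 [1, 2, 3, 4, 5]
  let b := pyRep 5 [2, 1, 2, 3, 2, 4, 2, 5]
  let c := pyRep 4 [3, 3, 1, 1, 2, 2, 4, 4, 5, 5]
  -- len(answers)//len(a)+1 : both lengths are Nat, so Nat division is exactly Python's //
  let abc :=
    if a.length < answers.length then
      let num := answers.length / a.length + 1
      (pyRep num a, pyRep num b, pyRep num c)
    else (a, b, c)
  -- a[idx] / b[idx] / c[idx]: idx < len(answers) ≤ length of each extended list, so the
  -- default of pyGetD is never used and the lookup is exactly Python's a[idx]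
  let count := (PySem.List.enumerate answers 0).foldl
    (fun (cnt : Int × Int × Int) (iv : Int × Int) =>
      let cnt := if PySem.List.pyGetD abc.1 iv.1 0 == iv.2 then (cnt.1 + 1, cnt.2.1, cnt.2.2) else cnt
      let cnt := if PySem.List.pyGetD abc.2.1 iv.1 0 == iv.2 then (cnt.1, cnt.2.1 + 1, cnt.2.2) else cnt
      if PySem.List.pyGetD abc.2.2 iv.1 0 == iv.2 then (cnt.1, cnt.2.1, cnt.2.2 + 1) else cnt)
    (0, 0, 0)
  -- max(count) on the nonempty 3-element list
  let m := (PySem.List.max? [count.1, count.2.1, count.2.2] (fun y => y)).getD 0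
  (PySem.List.enumerate [count.1, count.2.1, count.2.2] 1).foldl
    (fun answer iv => if iv.2 ≥ m then answer ++ [iv.1] else answer) []

-- ===== PORT B =====
def solution_alt (answers : List Int) : List Int :=
  -- freq[key] = freq.get(key, 0) + 1 over key = (i % 40, v)
  let freq := (PySem.List.enumerate answers 0).foldl
    (fun (d : PySem.Dict (Int × Int) Int) iv =>
      let key := (PySem.Int.mod iv.1 40, iv.2)
      d.insert key (d.getD key 0 + 1)) PySem.Dict.empty
  let patterns : List (List Int) :=
    [[1, 2, 3, 4, 5], [2, 1, 2, 3, 2, 4, 2, 5], [3, 3, 1, 1, 2, 2, 4, 4, 5, 5]]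
  let counts := patterns.map (fun p =>
    ((PySem.List.pyRange 0 40 1).map (fun r =>
      freq.getD (r, PySem.List.pyGetD p (PySem.Int.mod r (p.length : Int)) 0) 0)).sum)
  let m := (PySem.List.max? counts (fun y => y)).getD 0
  (PySem.List.enumerate counts 0).foldl
    (fun acc ic => if ic.2 == m then acc ++ [ic.1 + 1] else acc) []

-- ===== PRECONDITION & SPEC =====
def Spec_solution (answers : List Int) (out : List Int) : Prop := out = solution_alt answers
instance (answers : List Int) (out : List Int) : Decidable (Spec_solution answers out) := by unfold Spec_solution; infer_instance

-- ===== CLAIM (what is proved, stated in full; the proofs are below) =====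
def Claim_equal_solution : Prop := ∀ (answers : List Int), Dom_solution answers → Spec_solution answers (solution answers)

-- ===== LEMMAS AND PROOFS =====

lemma rep_get (p : List Int) (r i : Nat) (h : i < r * p.length) (d : Int) :
    (pyRep r p).getD i d = p.getD (i % p.length) d := by
  induction r generalizing i with
  | zero => omega
  | succ r ih =>
    have hp : 0 < p.length := by by_contra hh; simp at hh; simp [hh] at h
    by_cases hi : i < p.length
    · simp [pyRep, List.replicate_succ, List.getD, List.getElem?_append, hi, Nat.mod_eq_of_lt hi]
    · have h2 : i - p.length < r * p.length := by
        have : (r + 1) * p.length = r * p.length + p.length := by ring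
        omega
      have := ih (i - p.length) h2
      simp [pyRep, List.replicate_succ, List.getD, List.getElem?_append_right (by omega : p.length ≤ i)] at this ⊢
      rw [show i % p.length = (i - p.length) % p.length by
        conv_lhs => rw [show i = (i - p.length) + p.length by omega]
        simp [Nat.add_mod_right]]
      simpa [pyRep, List.getD] using this

lemma pyRep_succ (k : Nat) (p : List Int) : pyRep (k+1) p = p ++ pyRep k p := by
  simp [pyRep, List.replicate_succ]
lemma pyRep_add (a b : Nat) (p : List Int) : pyRep (a+b) p = pyRep a p ++ pyRep b p := by
  induction a with
  | zero => simp [pyRep]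
  | succ a ih => rw [show a+1+b = (a+b)+1 by ring, pyRep_succ, ih, pyRep_succ]; simp
lemma pyRep_mul (m k : Nat) (p : List Int) : pyRep m (pyRep k p) = pyRep (m * k) p := by
  induction m with
  | zero => simp [pyRep]
  | succ m ih => rw [pyRep_succ, ih, show (m+1)*k = k + m*k by ring, pyRep_add]

def matchSum (p : List Int) (xs : List Int) (s : Int) : Int :=
  ((PySem.List.enumerate xs s).map (fun iv =>
    if PySem.List.pyGetD p (PySem.Int.mod iv.1 (p.length:Int)) 0 == iv.2 then (1:Int) else 0)).sum

lemma count_loop (xs : List Int) (E1 E2 E3 p1 p2 p3 : List Int) (s : Nat) (c : Int × Int × Int)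
    (H1 : ∀ i : Nat, s ≤ i → i < s + xs.length →
      PySem.List.pyGetD E1 (i:Int) 0 = PySem.List.pyGetD p1 (PySem.Int.mod (i:Int) (p1.length:Int)) 0)
    (H2 : ∀ i : Nat, s ≤ i → i < s + xs.length →
      PySem.List.pyGetD E2 (i:Int) 0 = PySem.List.pyGetD p2 (PySem.Int.mod (i:Int) (p2.length:Int)) 0)
    (H3 : ∀ i : Nat, s ≤ i → i < s + xs.length →
      PySem.List.pyGetD E3 (i:Int) 0 = PySem.List.pyGetD p3 (PySem.Int.mod (i:Int) (p3.length:Int)) 0) :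
    (PySem.List.enumerate xs (s:Int)).foldl
      (fun (cnt : Int × Int × Int) (iv : Int × Int) =>
        let cnt := if PySem.List.pyGetD E1 iv.1 0 == iv.2 then (cnt.1 + 1, cnt.2.1, cnt.2.2) else cnt
        let cnt := if PySem.List.pyGetD E2 iv.1 0 == iv.2 then (cnt.1, cnt.2.1 + 1, cnt.2.2) else cnt
        if PySem.List.pyGetD E3 iv.1 0 == iv.2 then (cnt.1, cnt.2.1, cnt.2.2 + 1) else cnt) c
    = (c.1 + matchSum p1 xs s, c.2.1 + matchSum p2 xs s, c.2.2 + matchSum p3 xs s) := by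
  induction xs generalizing s c with
  | nil => simp [matchSum, PySem.List.enumerate]
  | cons x xs ih =>
    rw [PySem.List.enumerate_cons]
    simp only [List.foldl_cons]
    have hs1 : (s:Int) + 1 = ((s+1 : Nat) : Int) := by push_cast; ring
    rw [hs1, ih (s+1) _ (fun i h1 h2 => H1 i (by omega) (by rw [List.length_cons]; omega))
      (fun i h1 h2 => H2 i (by omega) (by rw [List.length_cons]; omega))
      (fun i h1 h2 => H3 i (by omega) (by rw [List.length_cons]; omega))]
    have e1 := H1 s (le_refl s) (by simp only [List.length_cons]; omega)
    have e2 := H2 s (le_refl s) (by simp only [List.length_cons]; omega)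
    have e3 := H3 s (le_refl s) (by simp only [List.length_cons]; omega)
    simp only [matchSum, PySem.List.enumerate_cons, List.map_cons, List.sum_cons, hs1, e1, e2, e3,
      beq_iff_eq]
    split_ifs <;> refine Prod.ext ?_ (Prod.ext ?_ ?_) <;> simp <;> ring

lemma ext_lookup (p : List Int) (r i : Nat) (h : i < r * p.length) :
    PySem.List.pyGetD (pyRep r p) (i:Int) 0 = PySem.List.pyGetD p (PySem.Int.mod (i:Int) (p.length:Int)) 0 := by
  have hm : PySem.Int.mod (i:Int) (p.length:Int) = ((i % p.length : Nat) : Int) := by simp [pysem]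
  rw [hm, PySem.List.pyGetD_natCast, PySem.List.pyGetD_natCast]
  exact rep_get p r i h 0

lemma select_eq (c1 c2 c3 : Int) :
    (PySem.List.enumerate [c1, c2, c3] 1).foldl
      (fun answer iv => if iv.2 ≥ ((PySem.List.max? [c1, c2, c3] (fun y => y)).getD 0) then answer ++ [iv.1] else answer) []
    = (PySem.List.enumerate [c1, c2, c3] 0).foldl
      (fun acc ic => if ic.2 == ((PySem.List.max? [c1, c2, c3] (fun y => y)).getD 0) then acc ++ [ic.1 + 1] else acc) [] := by
  have hm : (PySem.List.max? [c1, c2, c3] (fun y => y)).getD 0 = max (max c1 c2) c3 := by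
    rw [PySem.List.max?_id_cons]; simp [List.foldl]
  have b1 : c1 ≤ max (max c1 c2) c3 := le_trans (le_max_left _ _) (le_max_left _ _)
  have b2 : c2 ≤ max (max c1 c2) c3 := le_trans (le_max_right _ _) (le_max_left _ _)
  have b3 : c3 ≤ max (max c1 c2) c3 := le_max_right _ _
  simp only [hm, PySem.List.enumerate_cons, PySem.List.enumerate_nil, List.foldl_cons,
    List.foldl_nil, ge_iff_le, beq_iff_eq]
  norm_num
  split_ifs <;> first | rfl | omega

lemma count_loop0 (xs E1 E2 E3 p1 p2 p3 : List Int)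
    (H1 : ∀ i : Nat, i < xs.length →
      PySem.List.pyGetD E1 (i:Int) 0 = PySem.List.pyGetD p1 (PySem.Int.mod (i:Int) (p1.length:Int)) 0)
    (H2 : ∀ i : Nat, i < xs.length →
      PySem.List.pyGetD E2 (i:Int) 0 = PySem.List.pyGetD p2 (PySem.Int.mod (i:Int) (p2.length:Int)) 0)
    (H3 : ∀ i : Nat, i < xs.length →
      PySem.List.pyGetD E3 (i:Int) 0 = PySem.List.pyGetD p3 (PySem.Int.mod (i:Int) (p3.length:Int)) 0) :
    (PySem.List.enumerate xs 0).foldl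
      (fun (cnt : Int × Int × Int) (iv : Int × Int) =>
        let cnt := if PySem.List.pyGetD E1 iv.1 0 == iv.2 then (cnt.1 + 1, cnt.2.1, cnt.2.2) else cnt
        let cnt := if PySem.List.pyGetD E2 iv.1 0 == iv.2 then (cnt.1, cnt.2.1 + 1, cnt.2.2) else cnt
        if PySem.List.pyGetD E3 iv.1 0 == iv.2 then (cnt.1, cnt.2.1, cnt.2.2 + 1) else cnt) (0, 0, 0)
    = (matchSum p1 xs 0, matchSum p2 xs 0, matchSum p3 xs 0) := by
  have := count_loop xs E1 E2 E3 p1 p2 p3 0 (0, 0, 0)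
    (fun i _ h2 => H1 i (by omega)) (fun i _ h2 => H2 i (by omega)) (fun i _ h2 => H3 i (by omega))
  simpa using this

-- ---- B-side lemmas: histogram sum = matchSum ----

-- indicator sum over residues not containing x.1 is 0
lemma indSum_zero (rs : List Int) (g : Int → Int) (x1 x2 : Int) (hx : x1 ∉ rs) :
    (rs.map (fun r => if (x1, x2) = (r, g r) then (1:Int) else 0)).sum = 0 := by
  induction rs with
  | nil => simp
  | cons r rs ih =>
    have hr : x1 ≠ r := fun h => hx (h ▸ List.mem_cons_self)
    have : ¬ ((x1, x2) = (r, g r)) := by intro h; exact hr (congrArg Prod.fst h)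
    simp only [List.map_cons, List.sum_cons, if_neg this, zero_add]
    exact ih (fun h => hx (List.mem_cons_of_mem _ h))

lemma indSum (rs : List Int) (g : Int → Int) (x1 x2 : Int) (hnd : rs.Nodup) (hx : x1 ∈ rs) :
    (rs.map (fun r => if (x1, x2) = (r, g r) then (1:Int) else 0)).sum
      = if x2 = g x1 then 1 else 0 := by
  induction rs with
  | nil => cases hx
  | cons r rs ih =>
    rcases List.nodup_cons.mp hnd with ⟨hr, hnd'⟩
    by_cases h1 : x1 = r
    · subst h1
      have : (rs.map (fun r => if (x1, x2) = (r, g r) then (1:Int) else 0)).sum = 0 :=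
        indSum_zero rs g x1 x2 hr
      simp only [List.map_cons, List.sum_cons, this, add_zero]
      by_cases h2 : x2 = g x1
      · simp [h2]
      · have : ¬ ((x1, x2) = (x1, g x1)) := by
          intro h; exact h2 (congrArg Prod.snd h)
        simp [this, h2]
    · have hx' : x1 ∈ rs := by
        cases hx with
        | head => exact absurd rfl h1
        | tail _ h => exact h
      have hne : ¬ ((x1, x2) = (r, g r)) := by
        intro h; exact h1 (congrArg Prod.fst h)
      simp only [List.map_cons, List.sum_cons, if_neg hne, zero_add]
      exact ih hnd' hx'

lemma sum_count_eq_countP (M : List (Int × Int)) (rs : List Int) (g : Int → Int)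
    (hnd : rs.Nodup) (hmem : ∀ x ∈ M, x.1 ∈ rs) :
    (rs.map (fun r => (M.count (r, g r) : Int))).sum
      = (M.countP (fun x => x.2 == g x.1) : Int) := by
  induction M with
  | nil => simp
  | cons x M ih =>
    have hsplit : ∀ r : Int, ((x :: M).count (r, g r) : Int)
        = (M.count (r, g r) : Int) + (if (x.1, x.2) = (r, g r) then (1:Int) else 0) := by
      intro r
      rw [List.count_cons]
      by_cases h : x = (r, g r)
      · have hx : (x.1, x.2) = (r, g r) := by rw [← h]
        simp [h]
      · simp [h]
    calc (rs.map (fun r => ((x :: M).count (r, g r) : Int))).sum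
        = (rs.map (fun r => (M.count (r, g r) : Int)
            + (if (x.1, x.2) = (r, g r) then (1:Int) else 0))).sum := by
          congr 1; exact List.map_congr_left (fun r _ => hsplit r)
      _ = (rs.map (fun r => (M.count (r, g r) : Int))).sum
            + (rs.map (fun r => if (x.1, x.2) = (r, g r) then (1:Int) else 0)).sum := by
          rw [← List.sum_map_add]
      _ = ((M.countP (fun x => x.2 == g x.1)) : Int)
            + (if x.2 = g x.1 then (1:Int) else 0) := by
          rw [ih (fun y hy => hmem y (List.mem_cons_of_mem _ hy)),
            indSum rs g x.1 x.2 hnd (hmem x List.mem_cons_self)]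
      _ = ((x :: M).countP (fun x => x.2 == g x.1) : Int) := by
          rw [List.countP_cons]
          by_cases h : x.2 = g x.1 <;> simp [h]

lemma mod_mod_40 (s : Int) (L : Nat) (hdvd : (L:Int) ∣ 40) (h0 : 0 < L) :
    PySem.Int.mod (PySem.Int.mod s 40) (L:Int) = PySem.Int.mod s (L:Int) := by
  have hL : (0:Int) < (L:Int) := by exact_mod_cast h0
  rw [PySem.Int.mod_eq_emod_of_pos (by norm_num : (0:Int) < 40),
    PySem.Int.mod_eq_emod_of_pos hL, PySem.Int.mod_eq_emod_of_pos hL]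
  exact Int.emod_emod_of_dvd s hdvd

lemma beq_swap_int (u v : Int) : (u == v) = (v == u) := by
  by_cases h : u = v
  · rw [h]
  · have h1 : (u == v) = false := by simp [h]
    have h2 : (v == u) = false := by simp [Ne.symm h]
    rw [h1, h2]

lemma countP_eq_matchSum (p : List Int) (hdvd : ((p.length:Int)) ∣ 40) (h0 : 0 < p.length)
    (xs : List Int) (s : Int) :
    ((((PySem.List.enumerate xs s).map (fun iv => (PySem.Int.mod iv.1 40, iv.2))).countP
      (fun x => x.2 == PySem.List.pyGetD p (PySem.Int.mod x.1 (p.length:Int)) 0)) : Int)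
      = matchSum p xs s := by
  induction xs generalizing s with
  | nil => simp [matchSum, PySem.List.enumerate]
  | cons x xs ih =>
    have hmm := mod_mod_40 s p.length hdvd h0
    have hm2 : matchSum p (x :: xs) s =
        (if PySem.List.pyGetD p (PySem.Int.mod s (p.length:Int)) 0 == x then (1:Int) else 0)
          + matchSum p xs (s+1) := by
      simp only [matchSum, PySem.List.enumerate_cons, List.map_cons, List.sum_cons]
    rw [hm2, ← ih (s+1), PySem.List.enumerate_cons, List.map_cons, List.countP_cons]
    have hC : (((PySem.Int.mod (s, x).1 40, (s, x).2).2 ==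
        PySem.List.pyGetD p (PySem.Int.mod (PySem.Int.mod (s, x).1 40, (s, x).2).1 (p.length:Int)) 0))
        = (PySem.List.pyGetD p (PySem.Int.mod s (p.length:Int)) 0 == x) := by
      show (x == PySem.List.pyGetD p (PySem.Int.mod (PySem.Int.mod s 40) (p.length:Int)) 0) = _
      rw [hmm, beq_swap_int]
    rw [hC]
    by_cases h : (PySem.List.pyGetD p (PySem.Int.mod s (p.length:Int)) 0 == x) = true
    · rw [h, if_pos rfl, if_pos rfl]; push_cast; ring
    · rw [Bool.not_eq_true] at h
      rw [h, if_neg Bool.false_ne_true, if_neg Bool.false_ne_true]; push_cast; ring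

-- the histogram dict lookup is a count of the mapped enumerate list
lemma freq_getD (xs : List Int) (k : Int × Int) :
    ((PySem.List.enumerate xs 0).foldl
      (fun (d : PySem.Dict (Int × Int) Int) iv =>
        let key := (PySem.Int.mod iv.1 40, iv.2)
        d.insert key (d.getD key 0 + 1)) PySem.Dict.empty).getD k 0
    = (((PySem.List.enumerate xs 0).map (fun iv => (PySem.Int.mod iv.1 40, iv.2))).count k : Int) := by
  have hfold : ((PySem.List.enumerate xs 0).foldl
      (fun (d : PySem.Dict (Int × Int) Int) iv =>
        let key := (PySem.Int.mod iv.1 40, iv.2)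
        d.insert key (d.getD key 0 + 1)) PySem.Dict.empty)
      = PySem.Dict.counter ((PySem.List.enumerate xs 0).map (fun iv => (PySem.Int.mod iv.1 40, iv.2))) := by
    rw [← PySem.Dict.foldl_insert_getD_add_one_eq_counter, List.foldl_map]
  rw [hfold]
  exact PySem.Dict.getD_counter _ _

-- B's 40-term lookup sum equals matchSum
lemma bsum_eq_matchSum (xs : List Int) (p : List Int)
    (hdvd : ((p.length:Int)) ∣ 40) (h0 : 0 < p.length) :
    ((PySem.List.pyRange 0 40 1).map (fun r =>
      ((PySem.List.enumerate xs 0).foldl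
        (fun (d : PySem.Dict (Int × Int) Int) iv =>
          let key := (PySem.Int.mod iv.1 40, iv.2)
          d.insert key (d.getD key 0 + 1)) PySem.Dict.empty).getD
        (r, PySem.List.pyGetD p (PySem.Int.mod r (p.length : Int)) 0) 0)).sum
    = matchSum p xs 0 := by
  have hnd : (PySem.List.pyRange 0 40 1).Nodup := by decide
  have hmem : ∀ x ∈ (PySem.List.enumerate xs 0).map (fun iv => (PySem.Int.mod iv.1 40, iv.2)),
      x.1 ∈ PySem.List.pyRange 0 40 1 := by
    intro x hx
    rcases List.mem_map.mp hx with ⟨iv, _, rfl⟩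
    have h1 : 0 ≤ PySem.Int.mod iv.1 40 := PySem.Int.mod_nonneg _ (by norm_num)
    have h2 : PySem.Int.mod iv.1 40 < 40 := PySem.Int.mod_lt _ (by norm_num)
    rw [PySem.List.mem_pyRange_iff_of_pos (by norm_num)]
    exact ⟨h1, h2, one_dvd _⟩
  calc ((PySem.List.pyRange 0 40 1).map (fun r =>
        ((PySem.List.enumerate xs 0).foldl
          (fun (d : PySem.Dict (Int × Int) Int) iv =>
            let key := (PySem.Int.mod iv.1 40, iv.2)
            d.insert key (d.getD key 0 + 1)) PySem.Dict.empty).getD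
          (r, PySem.List.pyGetD p (PySem.Int.mod r (p.length : Int)) 0) 0)).sum
      = ((PySem.List.pyRange 0 40 1).map (fun r =>
          ((((PySem.List.enumerate xs 0).map (fun iv => (PySem.Int.mod iv.1 40, iv.2))).count
            (r, PySem.List.pyGetD p (PySem.Int.mod r (p.length : Int)) 0)) : Int))).sum := by
        congr 1; exact List.map_congr_left (fun r _ => freq_getD xs _)
    _ = ((((PySem.List.enumerate xs 0).map (fun iv => (PySem.Int.mod iv.1 40, iv.2))).countP
          (fun x => x.2 == PySem.List.pyGetD p (PySem.Int.mod x.1 (p.length:Int)) 0)) : Int) :=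
        sum_count_eq_countP _ _ _ hnd hmem
    _ = matchSum p xs 0 := countP_eq_matchSum p hdvd h0 xs 0

theorem main (answers : List Int) : solution answers = solution_alt answers := by
  simp only [solution, solution_alt]
  rw [List.map_cons, List.map_cons, List.map_cons, List.map_nil]
  rw [bsum_eq_matchSum answers [1,2,3,4,5] (by norm_num) (by norm_num),
      bsum_eq_matchSum answers [2,1,2,3,2,4,2,5] (by norm_num) (by norm_num),
      bsum_eq_matchSum answers [3,3,1,1,2,2,4,4,5,5] (by norm_num) (by norm_num)]
  by_cases hlen : (pyRep 8 [1, 2, 3, 4, 5] : List Int).length < answers.length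
  · simp only [if_pos hlen]
    have h40 : (pyRep 8 ([1, 2, 3, 4, 5] : List Int)).length = 40 := by simp [pyRep]
    rw [pyRep_mul, pyRep_mul, pyRep_mul]
    rw [count_loop0 answers _ _ _ [1, 2, 3, 4, 5] [2, 1, 2, 3, 2, 4, 2, 5] [3, 3, 1, 1, 2, 2, 4, 4, 5, 5]
      (fun i hi => ext_lookup _ _ i (by simp only [h40, List.length_cons, List.length_nil]; omega))
      (fun i hi => ext_lookup _ _ i (by simp only [h40, List.length_cons, List.length_nil]; omega))
      (fun i hi => ext_lookup _ _ i (by simp only [h40, List.length_cons, List.length_nil]; omega))]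
    exact select_eq _ _ _
  · simp only [if_neg hlen]
    have h40 : (pyRep 8 ([1, 2, 3, 4, 5] : List Int)).length = 40 := by simp [pyRep]
    have hn : answers.length ≤ 40 := by omega
    rw [count_loop0 answers _ _ _ [1, 2, 3, 4, 5] [2, 1, 2, 3, 2, 4, 2, 5] [3, 3, 1, 1, 2, 2, 4, 4, 5, 5]
      (fun i hi => ext_lookup [1, 2, 3, 4, 5] 8 i (by simp only [List.length_cons, List.length_nil]; omega))
      (fun i hi => ext_lookup [2, 1, 2, 3, 2, 4, 2, 5] 5 i (by simp only [List.length_cons, List.length_nil]; omega))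
      (fun i hi => ext_lookup [3, 3, 1, 1, 2, 2, 4, 4, 5, 5] 4 i (by simp only [List.length_cons, List.length_nil]; omega))]
    exact select_eq _ _ _

-- ===== VERDICT (by name: the statement is the Claim_ definition above) =====
theorem solution_spec : Claim_equal_solution := by
  intro answers _
  unfold Spec_solution
  exact main answers
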